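-- pv_equiv track=rewrite | github.com/Nev-elion/ComplyPanda | Scripts/upload_pdfs.py | detect_source_and_category
-- ===== SOURCE A (Python) =====
-- def detect_source_and_category(filename, folder_name):
--     """Rileva automaticamente fonte e categoria"""
--     filename_lower = filename.lower()
--     folder_lower = folder_name.lower()
--
--     # UIF
--     if 'uif' in folder_lower or any(word in filename_lower for word in ['quaderno', 'rapporto uif', 'comunicazione uif']):
--         return 'UIF', 'AML'
--
--     # FATF
--     if 'fatf' in folder_lower or 'gafi' in folder_lower or any(word in filename_lower for word in ['fatf', 'recommendation']):
--         return 'FATF', 'AML'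
--
--     # Banca d'Italia
--     if 'bancaitalia' in folder_lower or 'banca' in folder_lower or any(word in filename_lower for word in ['circolare', 'provvedimento', 'disposizioni']):
--         return 'Banca Italia', 'KYC'
--
--     # EBA
--     if 'eba' in folder_lower or 'eba' in filename_lower:
--         return 'EBA', 'AML'
--
--     # EU
--     if any(word in filename_lower for word in ['direttiva', 'regolamento', 'directive', 'regulation']):
--         return 'EU Commission', 'AML'
--
--     # Default
--     return 'Other', 'AML'
-- ===== SOURCE B (Python) =====
-- # Different algorithm: instead of an ordered first-match scan, assign every keyword a
-- # priority number, compute the MINIMUM priority over all matching keywords (folder and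
-- # filename keyword maps scanned independently), and index a result table by that minimum.
-- FOLDER_KW = {'uif': 0, 'fatf': 1, 'gafi': 1, 'bancaitalia': 2, 'banca': 2, 'eba': 3}
-- FILE_KW = {'quaderno': 0, 'rapporto uif': 0, 'comunicazione uif': 0,
--            'fatf': 1, 'recommendation': 1,
--            'circolare': 2, 'provvedimento': 2, 'disposizioni': 2,
--            'eba': 3,
--            'direttiva': 4, 'regolamento': 4, 'directive': 4, 'regulation': 4}
-- RESULTS = [('UIF', 'AML'), ('FATF', 'AML'), ('Banca Italia', 'KYC'),
--            ('EBA', 'AML'), ('EU Commission', 'AML'), ('Other', 'AML')]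
--
-- def detect_source_and_category(filename, folder_name):
--     filename_lower = filename.lower()
--     folder_lower = folder_name.lower()
--     best = 5
--     for kw, p in FOLDER_KW.items():
--         if p < best and kw in folder_lower:
--             best = p
--     for kw, p in FILE_KW.items():
--         if p < best and kw in filename_lower:
--             best = p
--     return RESULTS[best]
-- ===== Notes on version B (the rewrite author's own statement) =====
-- stated objective: alternative
-- what changed: Replaces the ordered first-match if-chain with a priority-minimization pass: every keyword carries a priority number, B computes the minimum priority over all matching keywords (folder map then filename map, order-independent) and indexes a result table by that minimum.
import Mathlib
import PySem

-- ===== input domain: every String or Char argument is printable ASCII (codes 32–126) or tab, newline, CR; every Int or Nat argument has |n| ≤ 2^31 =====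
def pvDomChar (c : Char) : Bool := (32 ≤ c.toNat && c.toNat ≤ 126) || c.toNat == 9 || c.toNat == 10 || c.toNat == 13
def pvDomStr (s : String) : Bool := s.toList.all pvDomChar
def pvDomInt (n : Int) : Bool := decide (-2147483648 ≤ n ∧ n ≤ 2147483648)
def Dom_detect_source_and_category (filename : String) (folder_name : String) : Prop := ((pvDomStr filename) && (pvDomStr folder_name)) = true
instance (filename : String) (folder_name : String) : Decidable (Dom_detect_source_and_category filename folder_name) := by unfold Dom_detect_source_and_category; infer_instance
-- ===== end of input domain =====

-- B replaces A's ordered first-match if-chain by a priority-minimization algorithm: every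
-- keyword carries a priority, B computes the minimum priority over all matching keywords
-- and indexes a result table by it (objective: alternative, same cost).

-- ===== PORT A =====
def detect_source_and_category (filename : String) (folder_name : String) : String × String :=
  let filename_lower := PySem.Str.lower filename
  let folder_lower := PySem.Str.lower folder_name
  if PySem.Str.isIn "uif" folder_lower ||
      ["quaderno", "rapporto uif", "comunicazione uif"].any (fun word => PySem.Str.isIn word filename_lower) then
    ("UIF", "AML")
  else if PySem.Str.isIn "fatf" folder_lower || PySem.Str.isIn "gafi" folder_lower ||
      ["fatf", "recommendation"].any (fun word => PySem.Str.isIn word filename_lower) then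
    ("FATF", "AML")
  else if PySem.Str.isIn "bancaitalia" folder_lower || PySem.Str.isIn "banca" folder_lower ||
      ["circolare", "provvedimento", "disposizioni"].any (fun word => PySem.Str.isIn word filename_lower) then
    ("Banca Italia", "KYC")
  else if PySem.Str.isIn "eba" folder_lower || PySem.Str.isIn "eba" filename_lower then
    ("EBA", "AML")
  else if ["direttiva", "regolamento", "directive", "regulation"].any (fun word => PySem.Str.isIn word filename_lower) then
    ("EU Commission", "AML")
  else
    ("Other", "AML")

-- ===== PORT B =====
def pvFolderKw : List (String × Nat) :=
  [("uif", 0), ("fatf", 1), ("gafi", 1), ("bancaitalia", 2), ("banca", 2), ("eba", 3)]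

def pvFileKw : List (String × Nat) :=
  [("quaderno", 0), ("rapporto uif", 0), ("comunicazione uif", 0),
   ("fatf", 1), ("recommendation", 1),
   ("circolare", 2), ("provvedimento", 2), ("disposizioni", 2),
   ("eba", 3),
   ("direttiva", 4), ("regolamento", 4), ("directive", 4), ("regulation", 4)]

def pvResults : List (String × String) :=
  [("UIF", "AML"), ("FATF", "AML"), ("Banca Italia", "KYC"),
   ("EBA", "AML"), ("EU Commission", "AML"), ("Other", "AML")]

-- the Python for-loop: 'if p < best and kw in hay: best = p'
def pvBestPri (hay : String) (best : Nat) : List (String × Nat) → Nat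
  | [] => best
  | (kw, p) :: rest =>
      pvBestPri hay (if p < best && PySem.Str.isIn kw hay then p else best) rest

def detect_source_and_category_alt (filename : String) (folder_name : String) : String × String :=
  let filename_lower := PySem.Str.lower filename
  let folder_lower := PySem.Str.lower folder_name
  let best := pvBestPri filename_lower (pvBestPri folder_lower 5 pvFolderKw) pvFileKw
  pvResults.getD best ("Other", "AML")   -- RESULTS[best]; best ≤ 5 always, so indexing never raises

-- ===== PRECONDITION & SPEC =====
def Spec_detect_source_and_category (filename : String) (folder_name : String) (out : String × String) : Prop := out = detect_source_and_category_alt filename folder_name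
instance (filename : String) (folder_name : String) (out : String × String) : Decidable (Spec_detect_source_and_category filename folder_name out) := by unfold Spec_detect_source_and_category; infer_instance

-- ===== CLAIM =====
def Claim_equal_detect_source_and_category : Prop := ∀ (filename : String) (folder_name : String), Dom_detect_source_and_category filename folder_name → Spec_detect_source_and_category filename folder_name (detect_source_and_category filename folder_name)

-- ===== LEMMAS AND PROOFS =====

-- pvBestPri never increases the accumulator
lemma bestPri_le (hay : String) (kws : List (String × Nat)) :
    ∀ best, pvBestPri hay best kws ≤ best := by
  induction kws with
  | nil => intro best; simp [pvBestPri]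
  | cons kp rest ih =>
    intro best
    obtain ⟨kw, p⟩ := kp
    simp only [pvBestPri]
    refine le_trans (ih _) ?_
    split_ifs with h
    · simp only [Bool.and_eq_true, decide_eq_true_eq] at h
      omega
    · exact le_rfl

-- any matching keyword bounds the result by its priority
lemma bestPri_le_of_mem (hay : String) (kws : List (String × Nat)) :
    ∀ best kw p, (kw, p) ∈ kws → PySem.Str.isIn kw hay = true →
      pvBestPri hay best kws ≤ p := by
  induction kws with
  | nil => intro _ _ _ h; simp at h
  | cons kp rest ih =>
    intro best kw p hmem hin
    obtain ⟨kw0, p0⟩ := kp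
    rcases List.mem_cons.mp hmem with heq | htail
    · obtain ⟨rfl, rfl⟩ := Prod.mk.injEq kw p kw0 p0 ▸ heq
      simp only [pvBestPri, hin, Bool.and_true]
      by_cases hb : p < best
      · simp only [hb, decide_true, if_true]
        exact bestPri_le hay rest p
      · simp only [hb, decide_false]
        exact le_trans (bestPri_le hay rest best) (by omega)
    · simp only [pvBestPri]
      exact ih _ _ _ htail hin

-- if no matching keyword has priority below k and the start is ≥ k, the result is ≥ k
lemma bestPri_lower (hay : String) (kws : List (String × Nat)) :
    ∀ best k, k ≤ best →
      (∀ kw p, (kw, p) ∈ kws → PySem.Str.isIn kw hay = true → k ≤ p) →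
      k ≤ pvBestPri hay best kws := by
  induction kws with
  | nil => intro best k hk _; simpa [pvBestPri] using hk
  | cons kp rest ih =>
    intro best k hk hall
    obtain ⟨kw0, p0⟩ := kp
    simp only [pvBestPri]
    refine ih _ _ ?_ (fun kw p hm hi => hall kw p (List.mem_cons_of_mem _ hm) hi)
    split_ifs with h
    · simp only [Bool.and_eq_true, decide_eq_true_eq] at h
      exact hall kw0 p0 (List.mem_cons_self ..) h.2
    · exact hk

-- the folder-then-filename minimum is ≥ k when every matching keyword has priority ≥ k
lemma lower_both (fl fo : String) (k : Nat) (hk : k ≤ 5)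
    (hfol : ∀ kw p, (kw, p) ∈ pvFolderKw → PySem.Str.isIn kw fo = true → k ≤ p)
    (hfile : ∀ kw p, (kw, p) ∈ pvFileKw → PySem.Str.isIn kw fl = true → k ≤ p) :
    k ≤ pvBestPri fl (pvBestPri fo 5 pvFolderKw) pvFileKw :=
  bestPri_lower fl pvFileKw _ k (bestPri_lower fo pvFolderKw 5 k hk hfol) hfile

-- ===== VERDICT =====
theorem detect_source_and_category_spec : Claim_equal_detect_source_and_category := by
  intro filename folder_name _
  unfold Spec_detect_source_and_category detect_source_and_category detect_source_and_category_alt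
  simp only [List.any_cons, List.any_nil, Bool.or_false]
  split_ifs with h1 h2 h3 h4 h5
  · -- UIF
    have hT : pvBestPri (PySem.Str.lower filename) (pvBestPri (PySem.Str.lower folder_name) 5 pvFolderKw) pvFileKw = 0 := by
      have hup : pvBestPri (PySem.Str.lower filename) (pvBestPri (PySem.Str.lower folder_name) 5 pvFolderKw) pvFileKw ≤ 0 := by
        simp only [Bool.or_eq_true] at h1
        rcases h1 with hf | hq | hr | hc
        · exact le_trans (bestPri_le ..) (bestPri_le_of_mem _ _ _ _ _ (by simp [pvFolderKw]) hf)
        · exact bestPri_le_of_mem _ _ _ _ _ (by simp [pvFileKw]) hq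
        · exact bestPri_le_of_mem _ _ _ _ _ (by simp [pvFileKw]) hr
        · exact bestPri_le_of_mem _ _ _ _ _ (by simp [pvFileKw]) hc
      omega
    rw [hT]; rfl
  · -- FATF
    simp only [Bool.or_eq_true, not_or, Bool.not_eq_true] at h1
    obtain ⟨n1, n2, n3, n4⟩ := h1
    have hT : pvBestPri (PySem.Str.lower filename) (pvBestPri (PySem.Str.lower folder_name) 5 pvFolderKw) pvFileKw = 1 := by
      have hup : pvBestPri (PySem.Str.lower filename) (pvBestPri (PySem.Str.lower folder_name) 5 pvFolderKw) pvFileKw ≤ 1 := by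
        simp only [Bool.or_eq_true] at h2
        rcases h2 with (hf | hg) | hw | hr
        · exact le_trans (bestPri_le ..) (bestPri_le_of_mem _ _ _ _ _ (by simp [pvFolderKw]) hf)
        · exact le_trans (bestPri_le ..) (bestPri_le_of_mem _ _ _ _ _ (by simp [pvFolderKw]) hg)
        · exact bestPri_le_of_mem _ _ _ _ _ (by simp [pvFileKw]) hw
        · exact bestPri_le_of_mem _ _ _ _ _ (by simp [pvFileKw]) hr
      have hlow : 1 ≤ pvBestPri (PySem.Str.lower filename) (pvBestPri (PySem.Str.lower folder_name) 5 pvFolderKw) pvFileKw := by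
        refine lower_both _ _ 1 (by omega) ?_ ?_ <;>
          (intro kw p hm hi; simp only [pvFolderKw, pvFileKw] at hm; fin_cases hm <;> simp_all)
      omega
    rw [hT]; rfl
  · -- Banca Italia
    simp only [Bool.or_eq_true, not_or, Bool.not_eq_true] at h1 h2
    obtain ⟨n1, n2, n3, n4⟩ := h1
    obtain ⟨⟨n5, n6⟩, n7, n8⟩ := h2
    have hT : pvBestPri (PySem.Str.lower filename) (pvBestPri (PySem.Str.lower folder_name) 5 pvFolderKw) pvFileKw = 2 := by
      have hup : pvBestPri (PySem.Str.lower filename) (pvBestPri (PySem.Str.lower folder_name) 5 pvFolderKw) pvFileKw ≤ 2 := by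
        simp only [Bool.or_eq_true] at h3
        rcases h3 with (hbi | hb) | hc | hp | hd
        · exact le_trans (bestPri_le ..) (bestPri_le_of_mem _ _ _ _ _ (by simp [pvFolderKw]) hbi)
        · exact le_trans (bestPri_le ..) (bestPri_le_of_mem _ _ _ _ _ (by simp [pvFolderKw]) hb)
        · exact bestPri_le_of_mem _ _ _ _ _ (by simp [pvFileKw]) hc
        · exact bestPri_le_of_mem _ _ _ _ _ (by simp [pvFileKw]) hp
        · exact bestPri_le_of_mem _ _ _ _ _ (by simp [pvFileKw]) hd
      have hlow : 2 ≤ pvBestPri (PySem.Str.lower filename) (pvBestPri (PySem.Str.lower folder_name) 5 pvFolderKw) pvFileKw := by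
        refine lower_both _ _ 2 (by omega) ?_ ?_ <;>
          (intro kw p hm hi; simp only [pvFolderKw, pvFileKw] at hm; fin_cases hm <;> simp_all)
      omega
    rw [hT]; rfl
  · -- EBA
    simp only [Bool.or_eq_true, not_or, Bool.not_eq_true] at h1 h2 h3
    obtain ⟨n1, n2, n3, n4⟩ := h1
    obtain ⟨⟨n5, n6⟩, n7, n8⟩ := h2
    obtain ⟨⟨n9, n10⟩, n11, n12, n13⟩ := h3
    have hT : pvBestPri (PySem.Str.lower filename) (pvBestPri (PySem.Str.lower folder_name) 5 pvFolderKw) pvFileKw = 3 := by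
      have hup : pvBestPri (PySem.Str.lower filename) (pvBestPri (PySem.Str.lower folder_name) 5 pvFolderKw) pvFileKw ≤ 3 := by
        simp only [Bool.or_eq_true] at h4
        rcases h4 with he | hef
        · exact le_trans (bestPri_le ..) (bestPri_le_of_mem _ _ _ _ _ (by simp [pvFolderKw]) he)
        · exact bestPri_le_of_mem _ _ _ _ _ (by simp [pvFileKw]) hef
      have hlow : 3 ≤ pvBestPri (PySem.Str.lower filename) (pvBestPri (PySem.Str.lower folder_name) 5 pvFolderKw) pvFileKw := by
        refine lower_both _ _ 3 (by omega) ?_ ?_ <;>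
          (intro kw p hm hi; simp only [pvFolderKw, pvFileKw] at hm; fin_cases hm <;> simp_all)
      omega
    rw [hT]; rfl
  · -- EU Commission
    simp only [Bool.or_eq_true, not_or, Bool.not_eq_true] at h1 h2 h3 h4
    obtain ⟨n1, n2, n3, n4⟩ := h1
    obtain ⟨⟨n5, n6⟩, n7, n8⟩ := h2
    obtain ⟨⟨n9, n10⟩, n11, n12, n13⟩ := h3
    obtain ⟨n14, n15⟩ := h4
    have hT : pvBestPri (PySem.Str.lower filename) (pvBestPri (PySem.Str.lower folder_name) 5 pvFolderKw) pvFileKw = 4 := by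
      have hup : pvBestPri (PySem.Str.lower filename) (pvBestPri (PySem.Str.lower folder_name) 5 pvFolderKw) pvFileKw ≤ 4 := by
        simp only [Bool.or_eq_true] at h5
        rcases h5 with hd | hr | hdi | hre
        · exact bestPri_le_of_mem _ _ _ _ _ (by simp [pvFileKw]) hd
        · exact bestPri_le_of_mem _ _ _ _ _ (by simp [pvFileKw]) hr
        · exact bestPri_le_of_mem _ _ _ _ _ (by simp [pvFileKw]) hdi
        · exact bestPri_le_of_mem _ _ _ _ _ (by simp [pvFileKw]) hre
      have hlow : 4 ≤ pvBestPri (PySem.Str.lower filename) (pvBestPri (PySem.Str.lower folder_name) 5 pvFolderKw) pvFileKw := by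
        refine lower_both _ _ 4 (by omega) ?_ ?_ <;>
          (intro kw p hm hi; simp only [pvFolderKw, pvFileKw] at hm; fin_cases hm <;> simp_all)
      omega
    rw [hT]; rfl
  · -- Other
    simp only [Bool.or_eq_true, not_or, Bool.not_eq_true] at h1 h2 h3 h4 h5
    obtain ⟨n1, n2, n3, n4⟩ := h1
    obtain ⟨⟨n5, n6⟩, n7, n8⟩ := h2
    obtain ⟨⟨n9, n10⟩, n11, n12, n13⟩ := h3
    obtain ⟨n14, n15⟩ := h4
    obtain ⟨n16, n17, n18, n19⟩ := h5
    have hT : pvBestPri (PySem.Str.lower filename) (pvBestPri (PySem.Str.lower folder_name) 5 pvFolderKw) pvFileKw = 5 := by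
      have hup : pvBestPri (PySem.Str.lower filename) (pvBestPri (PySem.Str.lower folder_name) 5 pvFolderKw) pvFileKw ≤ 5 :=
        le_trans (bestPri_le ..) (bestPri_le ..)
      have hlow : 5 ≤ pvBestPri (PySem.Str.lower filename) (pvBestPri (PySem.Str.lower folder_name) 5 pvFolderKw) pvFileKw := by
        refine lower_both _ _ 5 le_rfl ?_ ?_ <;>
          (intro kw p hm hi; simp only [pvFolderKw, pvFileKw] at hm; fin_cases hm <;> simp_all)
      omega
    rw [hT]; rfl
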